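-- pv_equiv track=rewrite | github.com/dkrist/PhotoCatalog | scripts/photo_catalog.py | _tally_concern_severity
-- ===== SOURCE A (Python) =====
-- CONCERN_INFO = "[INFO]"
--
-- CONCERN_WARN = "[WARN]"
--
-- CONCERN_ERROR = "[ERROR]"
--
-- def _tally_concern_severity(concerns):
--     """
--     Count occurrences of each severity marker across *concerns* (a list
--     of strings). Returns a dict with keys 'info', 'warn', 'error'.
--     """
--     info = warn = error = 0
--     for msg in concerns:
--         if CONCERN_ERROR in msg:
--             error += 1
--         if CONCERN_WARN in msg:
--             warn += 1
--         if CONCERN_INFO in msg: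
--             info += 1
--     return {'info': info, 'warn': warn, 'error': error}
-- ===== SOURCE B (Python) =====
-- CONCERN_INFO = "[INFO]"
-- CONCERN_WARN = "[WARN]"
-- CONCERN_ERROR = "[ERROR]"
--
-- def _tally_concern_severity(concerns):
--     return {
--         'info': sum(CONCERN_INFO in m for m in concerns),
--         'warn': sum(CONCERN_WARN in m for m in concerns),
--         'error': sum(CONCERN_ERROR in m for m in concerns),
--     }
-- ===== Notes on version B (the rewrite author's own statement) =====
-- stated objective: idiomatic
-- what changed: Replaces the fused single loop with three mutable counters by three independent generator-sums over the list, one per severity marker, returning the dict directly.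
import Mathlib
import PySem

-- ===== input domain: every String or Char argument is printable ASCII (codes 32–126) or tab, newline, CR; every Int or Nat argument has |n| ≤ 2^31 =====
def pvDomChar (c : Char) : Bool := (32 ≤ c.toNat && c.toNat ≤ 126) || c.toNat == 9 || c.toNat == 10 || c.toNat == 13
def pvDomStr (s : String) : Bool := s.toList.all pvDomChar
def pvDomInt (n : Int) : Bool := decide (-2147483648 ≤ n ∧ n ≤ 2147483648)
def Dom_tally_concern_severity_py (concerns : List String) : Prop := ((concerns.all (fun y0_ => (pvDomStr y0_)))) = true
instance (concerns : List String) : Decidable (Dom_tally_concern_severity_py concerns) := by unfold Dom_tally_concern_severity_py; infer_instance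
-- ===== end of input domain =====

-- B replaces A's single fused loop with three counters by three independent per-marker sums (idiomatic decomposition; same cost).

-- ===== PORT A =====
-- single pass, three mutable counters (info, warn, error), branches in A's order
def tally_concern_severity_py (concerns : List String) : List (String × Int) :=
  let st := concerns.foldl (fun (s : Int × Int × Int) msg =>
    let s := if PySem.Str.isIn "[ERROR]" msg then (s.1, s.2.1, s.2.2 + 1) else s
    let s := if PySem.Str.isIn "[WARN]" msg then (s.1, s.2.1 + 1, s.2.2) else s
    if PySem.Str.isIn "[INFO]" msg then (s.1 + 1, s.2.1, s.2.2) else s) (0, 0, 0)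
  [("info", st.1), ("warn", st.2.1), ("error", st.2.2)]

-- ===== PORT B =====
-- three independent generator-sums (bool as 0/1), one per marker
def tally_concern_severity_py_alt (concerns : List String) : List (String × Int) :=
  [("info",  (concerns.map (fun m => if PySem.Str.isIn "[INFO]" m then (1:Int) else 0)).sum),
   ("warn",  (concerns.map (fun m => if PySem.Str.isIn "[WARN]" m then (1:Int) else 0)).sum),
   ("error", (concerns.map (fun m => if PySem.Str.isIn "[ERROR]" m then (1:Int) else 0)).sum)]

-- ===== PRECONDITION & SPEC =====
def Spec_tally_concern_severity_py (concerns : List String) (out : List (String × Int)) : Prop := out = tally_concern_severity_py_alt concerns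
instance (concerns : List String) (out : List (String × Int)) : Decidable (Spec_tally_concern_severity_py concerns out) := by unfold Spec_tally_concern_severity_py; infer_instance

-- ===== CLAIM (what is proved, stated in full; the proofs are below) =====
def Claim_equal_tally_concern_severity_py : Prop := ∀ (concerns : List String), Dom_tally_concern_severity_py concerns → Spec_tally_concern_severity_py concerns (tally_concern_severity_py concerns)

-- ===== LEMMAS AND PROOFS =====
-- loop invariant (generic over the three tests): the fold adds the three 0/1 sums to the incoming state
theorem tally_fold_inv (p q r : String → Bool) (l : List String) (i w e : Int) :
    l.foldl (fun (s : Int × Int × Int) msg =>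
      let s := if r msg then (s.1, s.2.1, s.2.2 + 1) else s
      let s := if q msg then (s.1, s.2.1 + 1, s.2.2) else s
      if p msg then (s.1 + 1, s.2.1, s.2.2) else s) (i, w, e)
    = (i + (l.map (fun m => if p m then (1:Int) else 0)).sum,
       w + (l.map (fun m => if q m then (1:Int) else 0)).sum,
       e + (l.map (fun m => if r m then (1:Int) else 0)).sum) := by
  induction l generalizing i w e with
  | nil => simp
  | cons hd tl ih =>
    simp only [List.foldl_cons, List.map_cons, List.sum_cons]
    cases hp : p hd <;> cases hq : q hd <;> cases hr : r hd <;>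
      simp only [hp, hq, hr, if_true, if_false, Bool.false_eq_true, ite_false, ite_true, ih] <;>
      refine Prod.ext ?_ (Prod.ext ?_ ?_) <;> simp <;> ring

-- ===== VERDICT (by name: the statement is the Claim_ definition above) =====
theorem tally_concern_severity_py_spec : Claim_equal_tally_concern_severity_py := by
  intro concerns _
  show tally_concern_severity_py concerns = tally_concern_severity_py_alt concerns
  unfold tally_concern_severity_py tally_concern_severity_py_alt
  rw [tally_fold_inv (fun m => PySem.Str.isIn "[INFO]" m) (fun m => PySem.Str.isIn "[WARN]" m)
        (fun m => PySem.Str.isIn "[ERROR]" m) concerns 0 0 0]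
  simp
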